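-- pv_equiv track=rewrite | github.com/gkgkgk78/Algorithm | 백준/Gold/1726. 로봇/로봇.py | roro
-- ===== SOURCE A (Python) =====
-- def roro(a, f):
--     co = 0
--     t = a
--     if a==f:
--         return 0
--     for i in range(3):
--         co += 1
--         t = (t + 1) % 4
--         if t == f:
--             break
--     co1 = 0
--     t = a
--     for i in range(3):
--         co1 += 1
--         t-=1
--         if t<0:
--             t=3
--         if t == f:
--             break
--     return min(co, co1)
-- ===== SOURCE B (Python) =====
-- def roro(a, f):
--     if a == f:
--         return 0
--     cw = ccw = a
--     for k in range(1, 4):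
--         cw = (cw + 1) % 4
--         ccw = ccw - 1 if ccw > 0 else 3
--         if f in (cw, ccw):
--             return k
--     return 3
-- ===== Notes on version B (the rewrite author's own statement) =====
-- stated objective: simpler
-- what changed: A's two separate capped counting loops (forward and backward, each with a break, combined by min) are fused into one simultaneous walk that advances both directions one step per iteration and returns the first step count at which either reaches the target.
import Mathlib
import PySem

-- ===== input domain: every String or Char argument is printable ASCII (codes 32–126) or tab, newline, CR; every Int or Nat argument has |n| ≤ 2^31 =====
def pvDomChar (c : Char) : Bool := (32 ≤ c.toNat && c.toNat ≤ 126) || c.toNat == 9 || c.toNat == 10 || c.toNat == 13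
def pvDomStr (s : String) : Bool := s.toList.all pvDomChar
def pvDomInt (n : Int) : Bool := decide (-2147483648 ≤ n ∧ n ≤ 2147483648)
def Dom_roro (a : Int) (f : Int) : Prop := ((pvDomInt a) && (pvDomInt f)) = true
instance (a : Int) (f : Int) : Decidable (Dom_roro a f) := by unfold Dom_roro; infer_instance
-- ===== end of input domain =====

-- B fuses A's two capped counting loops into one simultaneous two-direction walk with an early return (objective: simpler).

-- ===== PORT A =====
-- state: (co, t, broken); one iteration of 'for i in range(3)' of the forward loop
def roroFwdStep (f : Int) (s : Int × Int × Bool) (_ : Int) : Int × Int × Bool :=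
  match s with
  | (co, t, done) =>
    if done then (co, t, done)
    else
      let co := co + 1
      let t := PySem.Int.mod (t + 1) 4
      if t == f then (co, t, true) else (co, t, false)

-- one iteration of the backward loop: t -= 1; if t < 0: t = 3; break on t == f
def roroBwdStep (f : Int) (s : Int × Int × Bool) (_ : Int) : Int × Int × Bool :=
  match s with
  | (co1, t, done) =>
    if done then (co1, t, done)
    else
      let co1 := co1 + 1
      let t := t - 1
      let t := if t < 0 then 3 else t
      if t == f then (co1, t, true) else (co1, t, false)

def roro (a : Int) (f : Int) : Int :=
  if a == f then 0
  else
    let s := (PySem.List.pyRange 0 3 1).foldl (roroFwdStep f) (0, a, false)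
    let co := s.1
    let s1 := (PySem.List.pyRange 0 3 1).foldl (roroBwdStep f) (0, a, false)
    let co1 := s1.1
    min co co1

-- ===== PORT B =====
-- the 'for k in range(1, 4)' loop of Source B with its early 'return k'; [] is the loop
-- falling through to 'return 3'
def roroAltLoop (f : Int) (cw : Int) (ccw : Int) : List Int → Int
  | [] => 3
  | k :: ks =>
      let cw := PySem.Int.mod (cw + 1) 4
      let ccw := if ccw > 0 then ccw - 1 else 3
      if f = cw ∨ f = ccw then k else roroAltLoop f cw ccw ks

def roro_alt (a : Int) (f : Int) : Int :=
  if a = f then 0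
  else roroAltLoop f a a (PySem.List.pyRange 1 4 1)

-- ===== PRECONDITION & SPEC =====
def Spec_roro (a : Int) (f : Int) (out : Int) : Prop := out = roro_alt a f
instance (a : Int) (f : Int) (out : Int) : Decidable (Spec_roro a f out) := by unfold Spec_roro; infer_instance

-- ===== CLAIM =====
def Claim_equal_roro : Prop := ∀ (a : Int) (f : Int), Dom_roro a f → Spec_roro a f (roro a f)

-- ===== LEMMAS AND PROOFS =====
theorem pyRange03 : PySem.List.pyRange 0 3 1 = [0, 1, 2] := by decide

theorem pyRange14 : PySem.List.pyRange 1 4 1 = [1, 2, 3] := by decide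

theorem stepFwd_done (f co t i : Int) : roroFwdStep f (co, t, true) i = (co, t, true) := by
  simp [roroFwdStep]

theorem stepFwd_hit (f co t i : Int) (h : (t + 1) % 4 = f) :
    roroFwdStep f (co, t, false) i = (co + 1, f, true) := by
  simp [roroFwdStep, h]

theorem stepFwd_miss (f co t i : Int) (h : ¬ (t + 1) % 4 = f) :
    roroFwdStep f (co, t, false) i = (co + 1, (t + 1) % 4, false) := by
  simp [roroFwdStep, h]

-- the backward loop's update of t (A's form)
def bstep (t : Int) : Int := if t - 1 < 0 then 3 else t - 1

-- B's counter-clockwise update equals A's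
theorem astep_eq_bstep (t : Int) : (if t > 0 then t - 1 else 3) = bstep t := by
  unfold bstep; split_ifs <;> omega

theorem stepBwd_done (f co t i : Int) : roroBwdStep f (co, t, true) i = (co, t, true) := by
  simp [roroBwdStep]

theorem stepBwd_hit (f co t i : Int) (h : bstep t = f) :
    roroBwdStep f (co, t, false) i = (co + 1, f, true) := by
  simp only [roroBwdStep, Bool.false_eq_true, if_false, beq_iff_eq]
  rw [show (if t - 1 < 0 then (3:Int) else t - 1) = bstep t from rfl, h]
  simp

theorem stepBwd_miss (f co t i : Int) (h : ¬ bstep t = f) :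
    roroBwdStep f (co, t, false) i = (co + 1, bstep t, false) := by
  simp only [roroBwdStep, Bool.false_eq_true, if_false, beq_iff_eq]
  rw [show (if t - 1 < 0 then (3:Int) else t - 1) = bstep t from rfl]
  simp [h]

theorem fwd_char (a f : Int) :
    (([0, 1, 2] : List Int).foldl (roroFwdStep f) (0, a, false)).1 =
      if (a + 1) % 4 = f then 1
      else if ((a + 1) % 4 + 1) % 4 = f then 2 else 3 := by
  simp only [List.foldl]
  by_cases h1 : (a + 1) % 4 = f
  · rw [stepFwd_hit _ _ _ _ h1, stepFwd_done, stepFwd_done, if_pos h1]; norm_num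
  · rw [stepFwd_miss _ _ _ _ h1, if_neg h1]
    by_cases h2 : ((a + 1) % 4 + 1) % 4 = f
    · rw [stepFwd_hit _ _ _ _ h2, stepFwd_done, if_pos h2]; norm_num
    · rw [stepFwd_miss _ _ _ _ h2, if_neg h2]
      by_cases h3 : (((a + 1) % 4 + 1) % 4 + 1) % 4 = f
      · rw [stepFwd_hit _ _ _ _ h3]; norm_num
      · rw [stepFwd_miss _ _ _ _ h3]; norm_num

theorem bwd_char (a f : Int) :
    (([0, 1, 2] : List Int).foldl (roroBwdStep f) (0, a, false)).1 =
      if bstep a = f then 1 else if bstep (bstep a) = f then 2 else 3 := by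
  simp only [List.foldl]
  by_cases h1 : bstep a = f
  · rw [stepBwd_hit _ _ _ _ h1, stepBwd_done, stepBwd_done, if_pos h1]; norm_num
  · rw [stepBwd_miss _ _ _ _ h1, if_neg h1]
    by_cases h2 : bstep (bstep a) = f
    · rw [stepBwd_hit _ _ _ _ h2, stepBwd_done, if_pos h2]; norm_num
    · rw [stepBwd_miss _ _ _ _ h2, if_neg h2]
      by_cases h3 : bstep (bstep (bstep a)) = f
      · rw [stepBwd_hit _ _ _ _ h3]; norm_num
      · rw [stepBwd_miss _ _ _ _ h3]; norm_num

theorem altLoop_char (a f : Int) :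
    roroAltLoop f a a [1, 2, 3] =
      if f = (a + 1) % 4 ∨ f = bstep a then 1
      else if f = ((a + 1) % 4 + 1) % 4 ∨ f = bstep (bstep a) then 2
      else if f = (((a + 1) % 4 + 1) % 4 + 1) % 4 ∨ f = bstep (bstep (bstep a)) then 3
      else 3 := by
  simp only [roroAltLoop, PySem.Int.mod_eq_emod_of_pos (show (0:Int) < 4 by norm_num),
    astep_eq_bstep]

-- ===== VERDICT =====
set_option maxHeartbeats 1000000 in
theorem roro_spec : Claim_equal_roro := by
  intro a f _
  unfold Spec_roro roro roro_alt
  rw [pyRange03, pyRange14]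
  by_cases haf : a = f
  · simp [haf]
  · simp only [beq_iff_eq, haf, if_false]
    rw [fwd_char, bwd_char, altLoop_char]
    simp only [bstep]
    split_ifs <;> omega
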